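-- pv_equiv track=rewrite | github.com/Ulisex666/Geneticos-y-8-reinas | funciones.py | cruza2
-- ===== SOURCE A (Python) =====
-- def cruza2(ciclos, sujeto_1, sujeto_2):
--     hijo = [0 for i in range(len(sujeto_1))]
--     for i in range(len(ciclos)):
--         if i % 2 == 0:
--             for j in range(len(ciclos[i])):
--                 hijo[ciclos[i][j]] = sujeto_1[ciclos[i][j]]
--         else:
--             for j in range(len(ciclos[i])):
--                 hijo[ciclos[i][j]] = sujeto_2[ciclos[i][j]]
--     return hijo
-- ===== SOURCE B (Python) =====
-- def cruza2(ciclos, sujeto_1, sujeto_2):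
--     # One pass over the cycles records each position's cycle parity in a table,
--     # then a single full-length scan picks parent 1, parent 2 or 0 per slot.
--     par = [None] * len(sujeto_1)
--     for i, ciclo in enumerate(ciclos):
--         for c in ciclo:
--             par[c] = i % 2
--     hijo = []
--     for k, p in enumerate(par):
--         if p is None:
--             hijo.append(0)
--         elif p == 0:
--             hijo.append(sujeto_1[k])
--         else:
--             hijo.append(sujeto_2[k])
--     return hijo
-- ===== Notes on version B (the rewrite author's own statement) =====
-- stated objective: alternative
-- what changed: Replaces A's nested per-cycle assignments of parent values into a preallocated child with a one-pass parity table (a list sized by sujeto_1, last write wins) followed by a single full-length scan that picks parent 1, parent 2 or 0 per slot.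
-- outside the precondition, e.g. on cruza2([[0], [-1]], [1, 2], [3, 4, 5]): A returns [1, 5], B returns [1, 4]
import Mathlib
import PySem

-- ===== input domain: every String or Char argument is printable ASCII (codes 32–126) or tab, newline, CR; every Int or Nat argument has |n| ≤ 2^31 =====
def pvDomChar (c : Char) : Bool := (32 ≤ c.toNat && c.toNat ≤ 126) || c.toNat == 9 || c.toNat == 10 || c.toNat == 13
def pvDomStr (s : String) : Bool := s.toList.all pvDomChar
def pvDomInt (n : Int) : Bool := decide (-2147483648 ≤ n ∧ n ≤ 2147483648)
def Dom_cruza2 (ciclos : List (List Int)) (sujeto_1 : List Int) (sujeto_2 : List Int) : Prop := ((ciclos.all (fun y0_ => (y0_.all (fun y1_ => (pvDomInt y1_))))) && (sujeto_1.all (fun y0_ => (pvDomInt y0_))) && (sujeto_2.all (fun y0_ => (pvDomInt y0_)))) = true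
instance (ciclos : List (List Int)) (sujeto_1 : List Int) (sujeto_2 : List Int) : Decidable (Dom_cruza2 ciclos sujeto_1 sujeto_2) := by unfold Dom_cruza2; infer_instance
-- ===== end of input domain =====

-- B replaces A's nested per-cycle writes of parent values into the child with a one-pass
-- parity table plus a single full-length scan (alternative decomposition, same cost).


-- ===== PORT A =====
-- inner loop 'for j in range(len(cyc)): hijo[cyc[j]] = s[cyc[j]]' (same writes, same order)
def cruza2Write (s : List Int) (hijo : List Int) (cyc : List Int) : List Int :=
  cyc.foldl (fun h c => PySem.List.pySetD h c (PySem.List.pyGetD s c 0)) hijo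

-- outer loop 'for i in range(len(ciclos))', carrying the running index i
def cruza2Loop (sujeto_1 sujeto_2 : List Int) : Nat → List (List Int) → List Int → List Int
  | _, [], hijo => hijo
  | i, cyc :: rest, hijo =>
      cruza2Loop sujeto_1 sujeto_2 (i + 1) rest
        (if i % 2 == 0 then cruza2Write sujeto_1 hijo cyc else cruza2Write sujeto_2 hijo cyc)

def cruza2 (ciclos : List (List Int)) (sujeto_1 : List Int) (sujeto_2 : List Int) : List Int :=
  cruza2Loop sujeto_1 sujeto_2 0 ciclos (List.replicate sujeto_1.length 0)

-- ===== PORT B =====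
-- the if/elif/else body of B's final scan
def cruza2Sel (sujeto_1 sujeto_2 : List Int) (k : Int) : Option Int → Int
  | none => 0
  | some p => if p == 0 then PySem.List.pyGetD sujeto_1 k 0 else PySem.List.pyGetD sujeto_2 k 0

def cruza2_alt (ciclos : List (List Int)) (sujeto_1 : List Int) (sujeto_2 : List Int) : List Int :=
  -- par = [None]*len(sujeto_1); par[c] = i % 2 over enumerate(ciclos)
  -- (enumerate index is ≥ 0, so Int.emod matches Python's %)
  let par : List (Option Int) :=
    (PySem.List.enumerate ciclos 0).foldl
      (fun par p => p.2.foldl (fun par c => PySem.List.pySetD par c (some (p.1 % 2))) par)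
      (List.replicate sujeto_1.length none)
  -- 'for k, p in enumerate(par): hijo.append(...)' builds exactly one value per slot
  (PySem.List.enumerate par 0).map (fun q => cruza2Sel sujeto_1 sujeto_2 q.1 q.2)

-- ===== PRECONDITION & SPEC =====
-- Pre_ excludes cycle indices out of range of the lists they index (Python A raises
-- IndexError) and, for parents of DIFFERENT lengths, negative indices in odd-parity
-- cycles, where A's wraparound reads sujeto_2 relative to len(sujeto_2) while the
-- parity table is sized by sujeto_1 — a wraparound corner outside the natural index
-- domain of cycle crossover.
def Pre_cruza2 (ciclos : List (List Int)) (sujeto_1 : List Int) (sujeto_2 : List Int) : Prop :=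
  ∀ p ∈ PySem.List.enumerate ciclos 0, ∀ c ∈ p.2,
    -(sujeto_1.length : Int) ≤ c ∧ c < (sujeto_1.length : Int) ∧
      (p.1 % 2 = 1 → -(sujeto_2.length : Int) ≤ c ∧ c < (sujeto_2.length : Int) ∧
        (0 ≤ c ∨ sujeto_1.length = sujeto_2.length))
instance (ciclos : List (List Int)) (sujeto_1 : List Int) (sujeto_2 : List Int) : Decidable (Pre_cruza2 ciclos sujeto_1 sujeto_2) := by unfold Pre_cruza2; infer_instance

def pvWitness_cruza2 : List (List Int) × List Int × List Int :=
  ([[0, 2], [1]], [10, 20, 30], [40, 50, 60])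

def Spec_cruza2 (ciclos : List (List Int)) (sujeto_1 : List Int) (sujeto_2 : List Int) (out : List Int) : Prop := out = cruza2_alt ciclos sujeto_1 sujeto_2
instance (ciclos : List (List Int)) (sujeto_1 : List Int) (sujeto_2 : List Int) (out : List Int) : Decidable (Spec_cruza2 ciclos sujeto_1 sujeto_2 out) := by unfold Spec_cruza2; infer_instance

-- ===== CLAIM (what is proved, stated in full; the proofs are below) =====
def Claim_equal_cruza2 : Prop := ∀ (ciclos : List (List Int)) (sujeto_1 : List Int) (sujeto_2 : List Int), Dom_cruza2 ciclos sujeto_1 sujeto_2 → Pre_cruza2 ciclos sujeto_1 sujeto_2 → Spec_cruza2 ciclos sujeto_1 sujeto_2 (cruza2 ciclos sujeto_1 sujeto_2)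

-- ===== LEMMAS AND PROOFS =====

-- the slot a Python index c addresses in a list of length n (c in [-n, n))
def cruza2Slot (n : Nat) (c : Int) : Nat := if 0 ≤ c then c.toNat else ((n : Int) + c).toNat

theorem cruza2Slot_lt (n : Nat) (c : Int) (h1 : -(n : Int) ≤ c) (h2 : c < (n : Int)) :
    cruza2Slot n c < n := by
  unfold cruza2Slot; split <;> omega

-- in-range Python indexing resolves to the slot's Nat index
theorem pyIdx?_slot (n : Nat) (c : Int) (h1 : -(n : Int) ≤ c) (h2 : c < (n : Int)) :
    PySem.List.pyIdx? n c = some (cruza2Slot n c) := by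
  unfold PySem.List.pyIdx? cruza2Slot
  by_cases hc : 0 ≤ c
  · rw [if_pos hc, if_pos h2, if_pos hc]
  · rw [if_neg hc, if_pos h1, if_neg hc]
    congr 1
    omega

theorem pyIdx?_natCast_lt (n m : Nat) (h : m < n) : PySem.List.pyIdx? n (m : Int) = some m := by
  unfold PySem.List.pyIdx?
  rw [if_pos (by omega), if_pos (by exact_mod_cast h)]
  simp

-- an in-range write at Int index c is a write at the slot's Nat index
theorem pySetD_slot {α : Type} (xs : List α) (c : Int) (w : α)
    (h1 : -(xs.length : Int) ≤ c) (h2 : c < (xs.length : Int)) :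
    PySem.List.pySetD xs c w = PySem.List.pySetD xs ((cruza2Slot xs.length c : Nat) : Int) w := by
  simp [PySem.List.pySetD, PySem.List.pySet?, pyIdx?_slot xs.length c h1 h2,
    pyIdx?_natCast_lt _ _ (cruza2Slot_lt xs.length c h1 h2)]

-- an in-range read at Int index c is the read at the slot's Nat index
theorem pyGetD_slot (xs : List Int) (c : Int) (d : Int)
    (h1 : -(xs.length : Int) ≤ c) (h2 : c < (xs.length : Int)) :
    PySem.List.pyGetD xs c d = PySem.List.pyGetD xs ((cruza2Slot xs.length c : Nat) : Int) d := by
  simp [PySem.List.pyGetD, PySem.List.pyGet?, pyIdx?_slot xs.length c h1 h2,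
    pyIdx?_natCast_lt _ _ (cruza2Slot_lt xs.length c h1 h2)]

-- the per-cycle mark pass of B's first loop
def cruza2Mark (v : Int) (par : List (Option Int)) (cyc : List Int) : List (Option Int) :=
  cyc.foldl (fun par c => PySem.List.pySetD par c (some v)) par

-- B's whole first pass, from an arbitrary start table and start index
def cruza2ParLoop (rest : List (List Int)) (i : Int) (par : List (Option Int)) : List (Option Int) :=
  (PySem.List.enumerate rest i).foldl
    (fun par p => p.2.foldl (fun par c => PySem.List.pySetD par c (some (p.1 % 2))) par) par

theorem cruza2ParLoop_cons (cyc : List Int) (t : List (List Int)) (i : Int) (par : List (Option Int)) :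
    cruza2ParLoop (cyc :: t) i par = cruza2ParLoop t (i + 1) (cruza2Mark (i % 2) par cyc) := by
  simp [cruza2ParLoop, cruza2Mark, PySem.List.enumerate_cons]

theorem length_cruza2Write (s hijo cyc : List Int) :
    (cruza2Write s hijo cyc).length = hijo.length := by
  induction cyc generalizing hijo with
  | nil => rfl
  | cons c t ih =>
      simp only [cruza2Write, List.foldl_cons] at *
      rw [ih, PySem.List.length_pySetD]

theorem length_cruza2Mark (v : Int) (par : List (Option Int)) (cyc : List Int) :
    (cruza2Mark v par cyc).length = par.length := by
  induction cyc generalizing par with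
  | nil => rfl
  | cons c t ih =>
      simp only [cruza2Mark, List.foldl_cons] at *
      rw [ih, PySem.List.length_pySetD]

theorem length_cruza2Loop (s1 s2 : List Int) (rest : List (List Int)) (i : Nat) (hijo : List Int) :
    (cruza2Loop s1 s2 i rest hijo).length = hijo.length := by
  induction rest generalizing i hijo with
  | nil => rfl
  | cons cyc t ih =>
      simp only [cruza2Loop]
      rw [ih]
      split <;> exact length_cruza2Write _ _ _

theorem length_cruza2ParLoop (rest : List (List Int)) (i : Int) (par : List (Option Int)) :
    (cruza2ParLoop rest i par).length = par.length := by
  induction rest generalizing i par with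
  | nil => rfl
  | cons cyc t ih =>
      rw [cruza2ParLoop_cons, ih, length_cruza2Mark]

-- one cycle: A's value writes and B's parity marks stay in lockstep
theorem cruza2Write_mark (s1 s2 s : List Int) (v : Int) (cyc : List Int)
    (hcyc : ∀ c ∈ cyc, -(s1.length : Int) ≤ c ∧ c < (s1.length : Int))
    (hval : ∀ c ∈ cyc, PySem.List.pyGetD s c 0
      = cruza2Sel s1 s2 ((cruza2Slot s1.length c : Nat) : Int) (some v))
    (hijo : List Int) (par : List (Option Int))
    (hhl : hijo.length = s1.length) (hpl : par.length = s1.length)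
    (hinv : ∀ k : Nat, k < s1.length →
      PySem.List.pyGetD hijo (k : Int) 0
        = cruza2Sel s1 s2 (k : Int) (PySem.List.pyGetD par (k : Int) none)) :
    ∀ k : Nat, k < s1.length →
      PySem.List.pyGetD (cruza2Write s hijo cyc) (k : Int) 0
        = cruza2Sel s1 s2 (k : Int)
            (PySem.List.pyGetD (cruza2Mark v par cyc) (k : Int) none) := by
  induction cyc generalizing hijo par with
  | nil => simpa [cruza2Write, cruza2Mark] using hinv
  | cons c t ih =>
      obtain ⟨hc1, hc2⟩ := hcyc c (by simp)
      have hslot : cruza2Slot s1.length c < s1.length := cruza2Slot_lt _ _ hc1 hc2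
      simp only [cruza2Write, cruza2Mark, List.foldl_cons] at *
      refine ih (fun c hc => hcyc c (by simp [hc])) (fun c hc => hval c (by simp [hc])) _ _ ?_ ?_ ?_
      · rw [PySem.List.length_pySetD, hhl]
      · rw [PySem.List.length_pySetD, hpl]
      · intro m hm
        rw [pySetD_slot hijo c _ (by omega) (by omega),
          pySetD_slot par c _ (by omega) (by omega), hhl, hpl,
          PySem.List.pyGetD_pySetD_natCast hijo (cruza2Slot s1.length c) m _ _ (by omega),
          PySem.List.pyGetD_pySetD_natCast par (cruza2Slot s1.length c) m _ _ (by omega)]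
        by_cases hmc : m = cruza2Slot s1.length c
        · subst hmc
          rw [if_pos rfl, if_pos rfl]
          exact hval c (by simp)
        · rw [if_neg hmc, if_neg hmc]
          exact hinv m hm

-- the whole loop of A against the whole first pass of B, from any matching state
theorem cruza2Loop_parLoop (s1 s2 : List Int) (rest : List (List Int)) (i : Nat)
    (hijo : List Int) (par : List (Option Int))
    (hpre : ∀ p ∈ PySem.List.enumerate rest (i : Int), ∀ c ∈ p.2,
      -(s1.length : Int) ≤ c ∧ c < (s1.length : Int) ∧
        (p.1 % 2 = 1 → -(s2.length : Int) ≤ c ∧ c < (s2.length : Int) ∧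
          (0 ≤ c ∨ s1.length = s2.length)))
    (hhl : hijo.length = s1.length) (hpl : par.length = s1.length)
    (hinv : ∀ k : Nat, k < s1.length →
      PySem.List.pyGetD hijo (k : Int) 0
        = cruza2Sel s1 s2 (k : Int) (PySem.List.pyGetD par (k : Int) none)) :
    ∀ k : Nat, k < s1.length →
      PySem.List.pyGetD (cruza2Loop s1 s2 i rest hijo) (k : Int) 0
        = cruza2Sel s1 s2 (k : Int)
            (PySem.List.pyGetD (cruza2ParLoop rest (i : Int) par) (k : Int) none) := by
  induction rest generalizing i hijo par with
  | nil => simpa [cruza2Loop, cruza2ParLoop] using hinv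
  | cons cyc t ih =>
      have hhead := hpre ((i : Int), cyc) (by rw [PySem.List.enumerate_cons]; simp)
      have hcyc : ∀ c ∈ cyc, -(s1.length : Int) ≤ c ∧ c < (s1.length : Int) :=
        fun c hc => ⟨(hhead c hc).1, (hhead c hc).2.1⟩
      have hpre' : ∀ p ∈ PySem.List.enumerate t ((i + 1 : Nat) : Int), ∀ c ∈ p.2,
          -(s1.length : Int) ≤ c ∧ c < (s1.length : Int) ∧
            (p.1 % 2 = 1 → -(s2.length : Int) ≤ c ∧ c < (s2.length : Int) ∧
              (0 ≤ c ∨ s1.length = s2.length)) := by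
        intro p hp
        refine hpre p ?_
        rw [PySem.List.enumerate_cons]
        right
        simpa [Int.add_comm] using hp
      simp only [cruza2Loop, cruza2ParLoop_cons]
      by_cases hpar : i % 2 = 0
      · have hv0 : ((i : Int) % 2 == 0) = true := by simp; omega
        rw [if_pos (by simpa using hpar)]
        have hval : ∀ c ∈ cyc, PySem.List.pyGetD s1 c 0
            = cruza2Sel s1 s2 ((cruza2Slot s1.length c : Nat) : Int) (some ((i : Int) % 2)) := by
          intro c hc
          obtain ⟨h1, h2⟩ := hcyc c hc
          rw [cruza2Sel, if_pos hv0]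
          exact pyGetD_slot s1 c 0 h1 h2
        have := ih (i + 1)
          (cruza2Write s1 hijo cyc) (cruza2Mark ((i : Int) % 2) par cyc) hpre'
          (by rw [length_cruza2Write, hhl]) (by rw [length_cruza2Mark, hpl])
          (cruza2Write_mark s1 s2 s1 ((i : Int) % 2) cyc hcyc hval hijo par hhl hpl hinv)
        simpa [Int.add_comm] using this
      · have hv1 : ((i : Int) % 2 == 0) = false := by simp; omega
        have hodd : (i : Int) % 2 = 1 := by omega
        rw [if_neg (by simpa using hpar)]
        have hval : ∀ c ∈ cyc, PySem.List.pyGetD s2 c 0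
            = cruza2Sel s1 s2 ((cruza2Slot s1.length c : Nat) : Int) (some ((i : Int) % 2)) := by
          intro c hc
          obtain ⟨hs1, hs2, hor⟩ := (hhead c hc).2.2 hodd
          rw [cruza2Sel, if_neg (by simp at hv1 ⊢; exact hv1)]
          rcases hor with hc0 | heq
          · rw [show ((cruza2Slot s1.length c : Nat) : Int) = c by
              unfold cruza2Slot; split <;> omega]
          · rw [show cruza2Slot s1.length c = cruza2Slot s2.length c by rw [heq]]
            exact pyGetD_slot s2 c 0 (by omega) (by omega)
        have := ih (i + 1)
          (cruza2Write s2 hijo cyc) (cruza2Mark ((i : Int) % 2) par cyc) hpre'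
          (by rw [length_cruza2Write, hhl]) (by rw [length_cruza2Mark, hpl])
          (cruza2Write_mark s1 s2 s2 ((i : Int) % 2) cyc hcyc hval hijo par hhl hpl hinv)
        simpa [Int.add_comm] using this

-- ===== VERDICT (by name: the statement is the Claim_ definition above) =====
theorem cruza2_spec : Claim_equal_cruza2 := by
  intro ciclos s1 s2 _ hpre
  show cruza2 ciclos s1 s2 = cruza2_alt ciclos s1 s2
  have hlenA : (cruza2 ciclos s1 s2).length = s1.length := by
    rw [cruza2, length_cruza2Loop, List.length_replicate]
  have hparlen : (cruza2ParLoop ciclos 0 (List.replicate s1.length none)).length = s1.length := by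
    rw [length_cruza2ParLoop, List.length_replicate]
  have htab : ∀ k : Nat, k < s1.length →
      PySem.List.pyGetD (cruza2 ciclos s1 s2) (k : Int) 0
        = cruza2Sel s1 s2 (k : Int)
            (PySem.List.pyGetD (cruza2ParLoop ciclos 0 (List.replicate s1.length none)) (k : Int) none) := by
    have := cruza2Loop_parLoop s1 s2 ciclos 0
      (List.replicate s1.length 0) (List.replicate s1.length none)
      (by intro p hp; exact hpre p (by simpa using hp))
      (by simp) (by simp)
      (by intro k hk
          simp [cruza2Sel, PySem.List.pyGetD_natCast, List.getD_eq_getElem?_getD, hk])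
    simpa [cruza2] using this
  apply List.ext_getElem
  · rw [hlenA]
    simp only [cruza2_alt, List.length_map, PySem.List.length_enumerate]
    exact hparlen.symm
  · intro k hk hk2
    have hk1 : k < s1.length := by rwa [hlenA] at hk
    have hk3 : k < (cruza2ParLoop ciclos 0 (List.replicate s1.length none)).length := by omega
    have hlhs : (cruza2 ciclos s1 s2)[k] = PySem.List.pyGetD (cruza2 ciclos s1 s2) (k : Int) 0 := by
      rw [PySem.List.pyGetD_natCast, List.getD_eq_getElem?_getD, List.getElem?_eq_getElem hk]
      rfl
    rw [hlhs, htab k hk1]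
    have hrhs : (cruza2_alt ciclos s1 s2)[k]'hk2
        = cruza2Sel s1 s2 ((0 : Int) + (k : Int))
            ((cruza2ParLoop ciclos 0 (List.replicate s1.length none))[k]'hk3) := by
      simp only [cruza2_alt, List.getElem_map]
      rw [PySem.List.getElem_enumerate _ 0 k
        (by rw [PySem.List.length_enumerate]; exact hk3)]
      rfl
    rw [hrhs, PySem.List.pyGetD_natCast, List.getD_eq_getElem?_getD,
      List.getElem?_eq_getElem hk3]
    simp
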